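-- pv_equiv track=rewrite | github.com/sburnap/Advent2021 | Day18/Day18.py | add_left
-- ===== SOURCE A (Python) =====
-- def add_left(num: str, val: int):
--     end = None
--     i = len(num) - 1
--     while i >= 0:
--         if num[i].isdigit():
--             end = i + 1
--             break
--         i -= 1
--
--     if not end:
--         return num
--
--     start = end - 1
--     while i >= 0:
--         if num[i].isdigit():
--             start = i
--         else:
--             break
--         i -= 1
--
--     left = num[:start]
--     right = num[end:]
--     middle = str(int(num[start:end]) + val)
--
--     return left + middle + right
-- ===== SOURCE B (Python) =====
-- def add_left(num: str, val: int):
--     # Single forward pass tracking the current digit run; remember the last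
--     # completed run, then splice the added value back in.
--     run = None
--     best = None
--     for i, c in enumerate(num):
--         if c.isdigit():
--             if run is None:
--                 run = i
--         else:
--             if run is not None:
--                 best = (run, i)
--             run = None
--     if run is not None:
--         best = (run, len(num))
--     if best is None:
--         return num
--     start, end = best
--     return num[:start] + str(int(num[start:end]) + val) + num[end:]
-- ===== Notes on version B (the rewrite author's own statement) =====
-- stated objective: alternative
-- what changed: Replaced A's backward two-loop scan (find last digit, then walk left through the run) by a single forward pass that tracks the current digit run and remembers the last completed run, then splices once.
import Mathlib
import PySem

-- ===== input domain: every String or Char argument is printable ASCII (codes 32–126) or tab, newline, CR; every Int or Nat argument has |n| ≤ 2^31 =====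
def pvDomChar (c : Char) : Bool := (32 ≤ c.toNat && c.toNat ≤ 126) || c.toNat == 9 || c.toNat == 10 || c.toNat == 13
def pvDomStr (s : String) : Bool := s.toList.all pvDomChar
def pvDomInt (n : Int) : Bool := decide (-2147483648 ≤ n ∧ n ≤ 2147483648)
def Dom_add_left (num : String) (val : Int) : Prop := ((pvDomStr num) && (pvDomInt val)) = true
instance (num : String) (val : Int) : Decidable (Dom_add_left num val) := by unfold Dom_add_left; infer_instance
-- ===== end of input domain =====

-- B replaces A's backward two-loop scan by a single forward pass tracking digit runs (alternative decomposition, same cost).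

-- ===== PORT A =====
-- first while loop: i from len-1 downward, stop at the first digit (its index), none if no digit
def addLeftLoop1 (l : List Char) : Nat → Option Nat
  | 0 => if PySem.Chars.isdigit (l.getD 0 ' ') then some 0 else none
  | i+1 => if PySem.Chars.isdigit (l.getD (i+1) ' ') then some (i+1) else addLeftLoop1 l i

-- the found index ('end' is this + 1); 'while i >= 0' does not run on the empty string, leaving end = None
def aEnd (l : List Char) : Option Nat := if l.length = 0 then none else addLeftLoop1 l (l.length - 1)

-- second while loop: from the found index downward while digits, remembering the last digit index as start
def addLeftLoop2 (l : List Char) : Nat → Nat → Nat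
  | start, 0 => if PySem.Chars.isdigit (l.getD 0 ' ') then 0 else start
  | start, i+1 => if PySem.Chars.isdigit (l.getD (i+1) ' ') then addLeftLoop2 l (i+1) i else start

def add_left (num : String) (val : Int) : String :=
  match aEnd num.toList with
  | none => num            -- 'if not end: return num' (end = i+1 ≥ 1, so 'not end' ↔ end is None)
  | some i =>
      let e := i + 1
      let s := addLeftLoop2 num.toList i i   -- start = end - 1 = i, second loop restarts at i
      -- slices with in-range natural bounds: num[:s], num[s:e], num[e:] (= take/drop, cf. PySem.List.slice_natCast);
      -- int(num[s:e]) always parses (all digits), so the ValueError branch is dead (.getD 0)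
      String.ofList (num.toList.take s ++ PySem.Int.toChars ((PySem.Int.ofChars? ((num.toList.drop s).take (e - s))).getD 0 + val) ++ num.toList.drop e)

-- ===== PORT B =====
-- the for-loop over enumerate(num): run = start of the current digit run, best = last completed run
def altLoop : List Char → Nat → Option Nat → Option (Nat × Nat) → Option Nat × Option (Nat × Nat)
  | [], _, run, best => (run, best)
  | c :: rest, i, run, best =>
      if PySem.Chars.isdigit c then
        altLoop rest (i+1) (match run with | none => some i | some s => some s) best
      else
        altLoop rest (i+1) none (match run with | some s => some (s, i) | none => best)

def add_left_alt (num : String) (val : Int) : String :=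
  match altLoop num.toList 0 none none with
  | (run, best0) =>
    match (match run with | some s => some (s, num.toList.length) | none => best0) with
    | none => num
    | some (s, e) =>
        String.ofList (num.toList.take s ++ PySem.Int.toChars ((PySem.Int.ofChars? ((num.toList.drop s).take (e - s))).getD 0 + val) ++ num.toList.drop e)

-- ===== PRECONDITION & SPEC =====
def Spec_add_left (num : String) (val : Int) (out : String) : Prop := out = add_left_alt num val
instance (num : String) (val : Int) (out : String) : Decidable (Spec_add_left num val out) := by unfold Spec_add_left; infer_instance

-- ===== CLAIM (what is proved, stated in full; the proofs are below) =====
def Claim_equal_add_left : Prop := ∀ (num : String) (val : Int), Dom_add_left num val → Spec_add_left num val (add_left num val)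

-- ===== LEMMAS AND PROOFS =====

-- trailing nondigit count / trailing digit count
def ntk (l : List Char) : Nat := (l.reverse.takeWhile (fun c => !(PySem.Chars.isdigit c))).length
def dtk (l : List Char) : Nat := (l.reverse.takeWhile PySem.Chars.isdigit).length

-- one past the last digit, if any
def specEnd (l : List Char) : Option Nat := if ntk l = l.length then none else some (l.length - ntk l)
-- start of the digit run ending just before e
def runStart (l : List Char) (e : Nat) : Nat := e - dtk (l.take e)
-- the last maximal digit run (start, end)
def specRun (l : List Char) : Option (Nat × Nat) :=
  match specEnd l with
  | none => none
  | some e => some (runStart l e, e)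

theorem ntk_append (l : List Char) (c : Char) :
    ntk (l ++ [c]) = if PySem.Chars.isdigit c then 0 else ntk l + 1 := by
  simp [ntk, List.takeWhile]
  split_ifs <;> simp_all

theorem dtk_append (l : List Char) (c : Char) :
    dtk (l ++ [c]) = if PySem.Chars.isdigit c then dtk l + 1 else 0 := by
  simp [dtk, List.takeWhile]
  split_ifs <;> simp_all

theorem ntk_le (l : List Char) : ntk l ≤ l.length := by
  have := (List.takeWhile_sublist (l := l.reverse) (p := fun c => !(PySem.Chars.isdigit c))).length_le
  simpa [ntk] using this

theorem dtk_le (l : List Char) : dtk l ≤ l.length := by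
  have := (List.takeWhile_sublist (l := l.reverse) (p := PySem.Chars.isdigit)).length_le
  simpa [dtk] using this

theorem ntk_eq_zero_of_dtk_pos (l : List Char) (h : 0 < dtk l) : ntk l = 0 := by
  unfold ntk
  unfold dtk at h
  cases hr : l.reverse with
  | nil => simp [hr] at h
  | cons a r =>
      simp only [hr, List.takeWhile] at h ⊢
      cases hd : PySem.Chars.isdigit a <;> simp [hd] at h ⊢

theorem runStart_append (l : List Char) (c : Char) (e : Nat) (h : e ≤ l.length) :
    runStart (l ++ [c]) e = runStart l e := by
  simp [runStart, List.take_append_of_le_length h]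

theorem specEnd_append_nondigit (l : List Char) (c : Char) (hd : ¬ PySem.Chars.isdigit c = true) :
    specEnd (l ++ [c]) = specEnd l := by
  have hle := ntk_le l
  have h1 : ntk (l ++ [c]) = ntk l + 1 := by rw [ntk_append, if_neg hd]
  simp only [specEnd, h1, List.length_append, List.length_cons, List.length_nil]
  by_cases h : ntk l = l.length
  · rw [if_pos (by omega), if_pos h]
  · rw [if_neg (by omega), if_neg h]
    congr 1
    omega

theorem specRun_append_nondigit (l : List Char) (c : Char) (hd : ¬ PySem.Chars.isdigit c = true) :
    specRun (l ++ [c]) = specRun l := by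
  simp only [specRun, specEnd_append_nondigit l c hd]
  cases he : specEnd l with
  | none => rfl
  | some e =>
      have : e ≤ l.length := by
        simp only [specEnd] at he
        split at he
        · cases he
        · cases he; omega
      simp [runStart_append l c e this]

theorem specRun_of_dtk_pos (l : List Char) (h : 0 < dtk l) :
    specRun l = some (l.length - dtk l, l.length) := by
  have h0 : ntk l = 0 := ntk_eq_zero_of_dtk_pos l h
  have hlen : 0 < l.length := lt_of_lt_of_le h (dtk_le l)
  unfold specRun specEnd
  rw [if_neg (by omega), h0]
  simp [runStart]

-- A-side: the loops only look at the prefix they scan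
theorem getD_append_lt (l t : List Char) (i : Nat) (h : i < l.length) :
    (l ++ t).getD i ' ' = l.getD i ' ' := by
  simp [List.getD, List.getElem?_append_left h]

theorem getD_append_self (l : List Char) (c : Char) :
    (l ++ [c]).getD l.length ' ' = c := by
  simp [List.getD]

theorem addLeftLoop1_prefix (t : List Char) : ∀ (i : Nat) (l : List Char), i < l.length →
    addLeftLoop1 (l ++ t) i = addLeftLoop1 l i := by
  intro i
  induction i with
  | zero => intro l h; simp only [addLeftLoop1, getD_append_lt l t 0 h]
  | succ i ih =>
      intro l h
      simp only [addLeftLoop1, getD_append_lt l t (i+1) h]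
      split
      · rfl
      · exact ih l (by omega)

-- the first loop returns the index of a digit, at most its starting index
theorem addLeftLoop1_sound : ∀ (i : Nat) (l : List Char) (j : Nat), addLeftLoop1 l i = some j →
    j ≤ i ∧ PySem.Chars.isdigit (l.getD j ' ') = true := by
  intro i
  induction i with
  | zero =>
      intro l j h
      simp only [addLeftLoop1] at h
      split at h
      · cases h; exact ⟨Nat.le_refl _, by assumption⟩
      · cases h
  | succ i ih =>
      intro l j h
      simp only [addLeftLoop1] at h
      split at h
      · cases h; exact ⟨Nat.le_refl _, by assumption⟩
      · rcases ih l j h with ⟨h1, h2⟩; exact ⟨by omega, h2⟩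

theorem aEnd_eq (l : List Char) : aEnd l = (specEnd l).map (· - 1) := by
  induction l using List.reverseRecOn with
  | nil => simp [aEnd, specEnd, ntk]
  | append_singleton l c ih =>
      have hlen : (l ++ [c]).length = l.length + 1 := by simp
      by_cases hd : PySem.Chars.isdigit c = true
      · have hge : (l ++ [c]).getD l.length ' ' = c := getD_append_self l c
        have h1 : addLeftLoop1 (l ++ [c]) l.length = some l.length := by
          cases hl : l.length with
          | zero => simp only [addLeftLoop1, ← hl, hge, hd, if_true]
          | succ m => simp only [addLeftLoop1, ← hl, hge, hd, if_true]
        simp only [aEnd, hlen, Nat.add_sub_cancel, h1, specEnd, ntk_append, hd, if_true]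
        rw [if_neg (by omega)]
        simp
      · rw [specEnd_append_nondigit l c hd, ← ih]
        cases hl : l.length with
        | zero =>
            have hnil : l = [] := List.length_eq_zero_iff.mp hl
            subst hnil
            simp [aEnd, addLeftLoop1, hd]
        | succ m =>
            have hlt : m + 1 ≤ l.length := by omega
            have hge : (l ++ [c]).getD (m+1) ' ' = c := by
              rw [← hl]; exact getD_append_self l c
            simp only [aEnd, hlen, hl, Nat.add_sub_cancel, addLeftLoop1, hge, hd,
              if_neg (by omega : ¬ m + 1 + 1 = 0), if_neg (by omega : ¬ m + 1 = 0)]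
            exact addLeftLoop1_prefix [c] m l (by omega)

theorem take_succ_getD (l : List Char) (i : Nat) (h : i < l.length) :
    l.take (i + 1) = l.take i ++ [l.getD i ' '] := by
  rw [List.take_add_one]
  simp [List.getElem?_eq_getElem h, List.getD]

theorem addLeftLoop2_eq : ∀ (i : Nat) (l : List Char) (s : Nat), i < l.length →
    PySem.Chars.isdigit (l.getD i ' ') = true →
    addLeftLoop2 l s i = runStart l (i + 1) := by
  intro i
  induction i with
  | zero =>
      intro l s h hd
      have ht : l.take 1 = [l.getD 0 ' '] := by simpa using take_succ_getD l 0 h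
      have hdtk : dtk (l.take 1) = 1 := by
        rw [ht, show [l.getD 0 ' '] = [] ++ [l.getD 0 ' '] from rfl, dtk_append, if_pos hd]
        simp [dtk]
      simp only [addLeftLoop2]
      rw [if_pos hd]
      simp [runStart, hdtk]
  | succ i ih =>
      intro l s h hd
      have hi : i < l.length := by omega
      have ht : l.take (i + 2) = l.take (i + 1) ++ [l.getD (i+1) ' '] := take_succ_getD l (i+1) h
      have hdtk : dtk (l.take (i + 2)) = dtk (l.take (i + 1)) + 1 := by
        rw [ht, dtk_append, if_pos hd]
      have hdle : dtk (l.take (i + 1)) ≤ i + 1 := by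
        have := dtk_le (l.take (i + 1))
        simpa [Nat.min_def, hi] using this
      simp only [addLeftLoop2, hd, if_true]
      by_cases hdi : PySem.Chars.isdigit (l.getD i ' ') = true
      · rw [ih l (i+1) hi hdi]
        simp only [runStart, hdtk]
        omega
      · have htake : dtk (l.take (i + 1)) = 0 := by
          rw [take_succ_getD l i hi, dtk_append, if_neg hdi]
        have hloop : addLeftLoop2 l (i+1) i = i + 1 := by
          cases i with
          | zero => simp only [addLeftLoop2]; rw [if_neg hdi]
          | succ j => simp only [addLeftLoop2]; rw [if_neg hdi]
        rw [hloop]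
        simp only [runStart, hdtk, htake]
        omega

-- B-side: peeling the last character off the forward loop
theorem altLoop_append (c : Char) : ∀ (l : List Char) (i : Nat) (run : Option Nat) (best : Option (Nat × Nat)),
    altLoop (l ++ [c]) i run best =
      (match altLoop l i run best with
       | (r, b) =>
         if PySem.Chars.isdigit c then
           ((match r with | none => some (i + l.length) | some s => some s), b)
         else
           (none, (match r with | some s => some (s, i + l.length) | none => b))) := by
  intro l
  induction l with
  | nil => intro i run best; simp [altLoop]
  | cons a rest ih =>
      intro i run best
      simp only [List.cons_append, altLoop]
      split
      · rw [ih]; simp; ring_nf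
      · rw [ih]; simp; ring_nf

-- the forward loop computes the open trailing run and the last completed run
theorem altLoop_spec (l : List Char) :
    altLoop l 0 none none =
      ((if dtk l = 0 then none else some (l.length - dtk l)),
        specRun (l.take (l.length - dtk l))) := by
  induction l using List.reverseRecOn with
  | nil => simp [altLoop, dtk, specRun, specEnd, ntk]
  | append_singleton l c ih =>
      rw [altLoop_append, ih]
      have hdle := dtk_le l
      have hlen : (l ++ [c]).length = l.length + 1 := by simp
      by_cases hd : PySem.Chars.isdigit c = true
      · have hdtk : dtk (l ++ [c]) = dtk l + 1 := by rw [dtk_append, if_pos hd]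
        have h2 : (l ++ [c]).length - dtk (l ++ [c]) = l.length - dtk l := by
          rw [hdtk, hlen]; omega
        have htk : (l ++ [c]).take ((l ++ [c]).length - dtk (l ++ [c])) =
            l.take (l.length - dtk l) := by
          rw [h2, List.take_append_of_le_length (by omega)]
        by_cases h0 : dtk l = 0
        · simp only [hd, if_true, h0, hdtk]
          have h4 : (l ++ [c]).length - (0 + 1) = l.length := by rw [hlen]; omega
          rw [h4, Nat.sub_zero, Nat.zero_add, List.take_append_of_le_length (Nat.le_refl _)]
          rw [if_neg (by omega)]
        · simp only [hd, if_true, if_neg h0, hdtk]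
          rw [hlen]
          have h3 : l.length - dtk l = l.length + 1 - (dtk l + 1) := by omega
          rw [h3, List.take_append_of_le_length (by omega), if_neg (by omega)]
      · have hdtk : dtk (l ++ [c]) = 0 := by rw [dtk_append, if_neg hd]
        have htake : List.take ((l ++ [c]).length - dtk (l ++ [c])) (l ++ [c]) = l ++ [c] := by
          rw [hdtk]
          apply List.take_of_length_le
          omega
        rw [htake, specRun_append_nondigit l c hd, hdtk]
        simp only [hd, Bool.false_eq_true, if_false]
        by_cases h0 : dtk l = 0
        · rw [if_pos h0]
          simp [h0]
        · rw [if_neg h0, specRun_of_dtk_pos l (by omega)]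
          simp

-- both ports compute specRun and then splice identically
def spliceSpec (num : String) (val : Int) : String :=
  match specRun num.toList with
  | none => num
  | some (s, e) =>
      String.ofList (num.toList.take s ++
        PySem.Int.toChars ((PySem.Int.ofChars? ((num.toList.drop s).take (e - s))).getD 0 + val) ++
        num.toList.drop e)

theorem add_left_eq_spliceSpec (num : String) (val : Int) : add_left num val = spliceSpec num val := by
  unfold add_left spliceSpec
  cases he : specEnd num.toList with
  | none =>
      have ha : aEnd num.toList = none := by rw [aEnd_eq, he]; rfl
      simp [ha, specRun, he]
  | some e =>
      have hlt : ntk num.toList < num.toList.length := by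
        have := ntk_le num.toList
        simp only [specEnd] at he
        split at he
        · cases he
        · omega
      have heval : e = num.toList.length - ntk num.toList ∧ 1 ≤ e := by
        simp only [specEnd] at he
        rw [if_neg (by omega)] at he
        cases he
        exact ⟨rfl, by omega⟩
      have ha : aEnd num.toList = some (e - 1) := by rw [aEnd_eq, he]; rfl
      have hloop1 : addLeftLoop1 num.toList (num.toList.length - 1) = some (e - 1) := by
        have : aEnd num.toList = addLeftLoop1 num.toList (num.toList.length - 1) := by
          unfold aEnd; rw [if_neg (by omega)]
        rw [← this, ha]
      rcases addLeftLoop1_sound _ _ _ hloop1 with ⟨hle, hdig⟩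
      have hilt : e - 1 < num.toList.length := by omega
      have h2 : addLeftLoop2 num.toList (e-1) (e-1) = runStart num.toList e := by
        rw [addLeftLoop2_eq (e-1) num.toList (e-1) hilt hdig]
        congr 1
        omega
      have hsucc : e - 1 + 1 = e := by omega
      simp only [ha, specRun, he, h2, hsucc]

theorem add_left_alt_eq_spliceSpec (num : String) (val : Int) : add_left_alt num val = spliceSpec num val := by
  unfold add_left_alt spliceSpec
  rw [altLoop_spec]
  by_cases h0 : dtk num.toList = 0
  · simp [h0]
    have ht : List.take num.length num.toList = num.toList := by
      apply List.take_of_length_le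
      simp
    rw [ht]
  · rw [specRun_of_dtk_pos num.toList (by omega)]
    simp [h0]

-- ===== VERDICT (by name: the statement is the Claim_ definition above) =====
theorem add_left_spec : Claim_equal_add_left := by
  intro num val _
  unfold Spec_add_left
  rw [add_left_eq_spliceSpec, add_left_alt_eq_spliceSpec]
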